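-- pv_equiv track=rewrite | github.com/phuhung273/leetcode | math/mirror-distance-of-an-integer/1.py | mirrorDistance
-- ===== SOURCE A (Python) =====
-- def mirrorDistance(n: int) -> int:
--     rev = 0
--     temp = n
--     while temp != 0:
--         rev *= 10
--         newTemp = temp // 10
--         rev += temp - newTemp * 10
--         temp = newTemp
--
--     return abs(n - rev)
-- ===== SOURCE B (Python) =====
-- def mirrorDistance(n: int) -> int:
--     rev = sum((ord(c) - 48) * 10**i for i, c in enumerate(str(n)))
--     return abs(n - rev)
-- ===== Notes on version B (the rewrite author's own statement) =====
-- stated objective: idiomatic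
-- what changed: Replaces the divmod Horner loop with a positional power sum over the decimal string: the i-th character from the left contributes digit*10**i, which is exactly the reversed value, so no running accumulator or integer division is needed.
import Mathlib
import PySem

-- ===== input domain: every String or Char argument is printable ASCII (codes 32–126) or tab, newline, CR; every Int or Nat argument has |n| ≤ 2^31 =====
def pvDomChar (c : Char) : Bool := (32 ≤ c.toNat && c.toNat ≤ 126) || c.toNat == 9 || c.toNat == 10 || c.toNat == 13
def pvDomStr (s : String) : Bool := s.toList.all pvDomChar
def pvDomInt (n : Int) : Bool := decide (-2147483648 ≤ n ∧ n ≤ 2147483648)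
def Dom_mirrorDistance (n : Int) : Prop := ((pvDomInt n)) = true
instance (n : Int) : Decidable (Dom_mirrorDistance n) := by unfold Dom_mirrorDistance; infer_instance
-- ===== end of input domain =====

-- B replaces A's divmod Horner loop with a positional power sum over the decimal string (idiomatic; same cost).

-- ===== PORT A =====
-- the 'while temp != 0' loop; for temp < 0 the Python loop never terminates (temp // 10 stalls at -1),
-- so the 'temp ≤ 0' totality guard returns only where Python's own test 'temp != 0' stops the loop;
-- the diverging inputs (n < 0) are excluded by Pre_mirrorDistance.
def mirrorLoop (temp rev : Int) : Int :=
  if _h : temp ≤ 0 then rev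
  else
    let newTemp := PySem.Int.floordiv temp 10
    mirrorLoop newTemp (rev * 10 + (temp - newTemp * 10))
termination_by temp.toNat
decreasing_by
  have h1 : PySem.Int.floordiv temp 10 = temp / 10 :=
    PySem.Int.floordiv_eq_ediv_of_pos (by omega)
  simp only [h1]
  omega

def mirrorDistance (n : Int) : Int :=
  |n - mirrorLoop n 0|

-- ===== PORT B =====
-- rev = sum((ord(c) - 48) * 10**i for i, c in enumerate(str(n))); return abs(n - rev)
-- (the enumerate index i is ≥ 0 throughout, so Python's 10 ** i is exactly 10 ^ i.toNat)
def mirrorDistance_alt (n : Int) : Int :=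
  let rev := ((PySem.List.enumerate (PySem.Int.toChars n)).map
      (fun ic => ((ic.2.toNat : Int) - 48) * 10 ^ ic.1.toNat)).sum
  |n - rev|

-- ===== PRECONDITION & SPEC =====
-- A's loop never terminates for negative n (temp // 10 reaches and stays at -1), so Pre_ excludes n < 0.
def Pre_mirrorDistance (n : Int) : Prop := 0 ≤ n
instance (n : Int) : Decidable (Pre_mirrorDistance n) := by unfold Pre_mirrorDistance; infer_instance
def pvWitness_mirrorDistance : Int := 123

def Spec_mirrorDistance (n : Int) (out : Int) : Prop := out = mirrorDistance_alt n
instance (n : Int) (out : Int) : Decidable (Spec_mirrorDistance n out) := by unfold Spec_mirrorDistance; infer_instance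

-- ===== CLAIM (what is proved, stated in full; the proofs are below) =====
def Claim_equal_mirrorDistance : Prop := ∀ (n : Int), Dom_mirrorDistance n → Pre_mirrorDistance n → Spec_mirrorDistance n (mirrorDistance n)

-- ===== LEMMAS AND PROOFS =====

-- B's reversed value of a digit string (the enumerate sum, always starting at 0)
def revSum (cs : List Char) : Int :=
  ((PySem.List.enumerate cs).map (fun ic => ((ic.2.toNat : Int) - 48) * 10 ^ ic.1.toNat)).sum

theorem revSum_append_singleton (cs : List Char) (d : Char) :
    revSum (cs ++ [d]) = revSum cs + ((d.toNat : Int) - 48) * 10 ^ cs.length := by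
  simp [revSum, PySem.List.enumerate_append, PySem.List.enumerate_cons,
    PySem.List.enumerate_nil]

theorem digitChar_toNat_sub (d : Nat) (hd : d < 10) :
    (((Nat.digitChar d).toNat : Int)) - 48 = (d : Int) := by
  interval_cases d <;> decide

-- the loop invariant: for m > 0, A's Horner loop computes rev shifted past m's digits plus B's sum
theorem mirrorLoop_eq (m : Nat) (hm : 0 < m) (rev : Int) :
    mirrorLoop (m : Int) rev
      = rev * 10 ^ (Nat.toDigits 10 m).length + revSum (Nat.toDigits 10 m) := by
  induction m using Nat.strong_induction_on generalizing rev with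
  | _ m ih =>
    rw [mirrorLoop]
    have hneg : ¬ ((m : Int) ≤ 0) := by omega
    rw [dif_neg hneg]
    have hfd : PySem.Int.floordiv (m : Int) 10 = ((m / 10 : Nat) : Int) := by
      exact_mod_cast PySem.Int.floordiv_natCast m 10
    have hmod : (m : Int) - ((m / 10 : Nat) : Int) * 10 = ((m % 10 : Nat) : Int) := by
      push_cast; omega
    simp only [hfd, hmod]
    by_cases h10 : m < 10
    · have hq : m / 10 = 0 := Nat.div_eq_of_lt h10
      rw [hq]
      rw [mirrorLoop]
      rw [dif_pos (by exact_mod_cast Nat.le_refl 0)]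
      rw [Nat.toDigits_of_lt_base h10]
      have : revSum [Nat.digitChar m] = (m : Int) := by
        simp [revSum, PySem.List.enumerate_cons, PySem.List.enumerate_nil,
          digitChar_toNat_sub m h10]
      rw [this]
      rw [Nat.mod_eq_of_lt h10]
      simp
    · have hqpos : 0 < m / 10 := Nat.div_pos (by omega) (by omega)
      have hqlt : m / 10 < m := Nat.div_lt_self hm (by omega)
      have htd : Nat.toDigits 10 m
          = Nat.toDigits 10 (m / 10) ++ [Nat.digitChar (m % 10)] := by
        rw [Nat.toDigits_eq_if (by norm_num : (1:Nat) < 10)]; exact if_neg h10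
      rw [ih (m / 10) hqlt hqpos, htd]
      rw [revSum_append_singleton, List.length_append]
      rw [digitChar_toNat_sub (m % 10) (Nat.mod_lt _ (by omega))]
      simp [pow_succ]
      ring

theorem toChars_natCast (m : Nat) :
    PySem.Int.toChars (m : Int) = Nat.toDigits 10 m := by
  simp [PySem.Int.toChars]

-- ===== VERDICT (by name: the statement is the Claim_ definition above) =====
theorem mirrorDistance_spec : Claim_equal_mirrorDistance := by
  intro n _ hpre
  show mirrorDistance n = mirrorDistance_alt n
  obtain ⟨m, rfl⟩ : ∃ m : Nat, n = (m : Int) := ⟨n.toNat, (Int.toNat_of_nonneg hpre).symm⟩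
  have halt : mirrorDistance_alt (m : Int) = |(m : Int) - revSum (Nat.toDigits 10 m)| := by
    simp only [mirrorDistance_alt, toChars_natCast]; rfl
  rcases Nat.eq_zero_or_pos m with hz | hp
  · subst hz
    rw [halt]
    simp [mirrorDistance, mirrorLoop, Nat.toDigits_zero, revSum,
      PySem.List.enumerate_cons, PySem.List.enumerate_nil]
  · rw [halt, mirrorDistance, mirrorLoop_eq m hp 0]
    ring_nf
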